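-- pv_equiv track=rewrite | github.com/braydos-h/NetCheckAi | tools/sub_agents.py | _compact_messages
-- ===== SOURCE A (Python) =====
-- from typing import TYPE_CHECKING, Any
--
-- def _compact_messages(messages: list[dict[str, Any]], keep_full_tool_results: int = 3) -> list[dict[str, Any]]:
--     """Trim older tool results to reduce LLM token usage while keeping full context for recent rounds."""
--     if len(messages) <= keep_full_tool_results + 2:
--         return messages
--     compacted: list[dict[str, Any]] = []
--     tool_result_count = 0
--     for msg in reversed(messages):
--         if msg.get("role") == "tool":
--             tool_result_count += 1
--             if tool_result_count > keep_full_tool_results: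
--                 # Replace bulky result with a summary placeholder
--                 name = msg.get("tool_name", "tool")
--                 compacted.append({
--                     "role": "tool",
--                     "tool_name": name,
--                     "content": f"[{name} result omitted to save context; see later full results.]",
--                 })
--                 continue
--         compacted.append(msg)
--     return list(reversed(compacted))
-- ===== SOURCE B (Python) =====
-- def _summarize(msg):
--     name = msg.get("tool_name", "tool")
--     return {
--         "role": "tool",
--         "tool_name": name,
--         "content": f"[{name} result omitted to save context; see later full results.]",
--     }
--
-- def _compact_messages(messages, keep_full_tool_results=3):
--     """Trim older tool results to reduce LLM token usage while keeping full context for recent rounds."""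
--     if len(messages) <= keep_full_tool_results + 2:
--         return messages
--     total = sum(1 for m in messages if m.get("role") == "tool")
--     cutoff = total - keep_full_tool_results
--     # split = index just past the last tool message that must be summarized
--     split = 0
--     seen = 0
--     for i, m in enumerate(messages):
--         if m.get("role") == "tool":
--             seen += 1
--             if seen > cutoff:
--                 break
--             split = i + 1
--     head = [_summarize(m) if m.get("role") == "tool" else m for m in messages[:split]]
--     return head + messages[split:]
-- ===== Notes on version B (the rewrite author's own statement) =====
-- stated objective: alternative
-- what changed: Replaces A's reverse-iterate-and-re-reverse with three staged passes: count tool messages, locate the split index just past the last tool message to summarize, then return a summarized map of the prefix concatenated with the untouched suffix.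
import Mathlib
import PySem

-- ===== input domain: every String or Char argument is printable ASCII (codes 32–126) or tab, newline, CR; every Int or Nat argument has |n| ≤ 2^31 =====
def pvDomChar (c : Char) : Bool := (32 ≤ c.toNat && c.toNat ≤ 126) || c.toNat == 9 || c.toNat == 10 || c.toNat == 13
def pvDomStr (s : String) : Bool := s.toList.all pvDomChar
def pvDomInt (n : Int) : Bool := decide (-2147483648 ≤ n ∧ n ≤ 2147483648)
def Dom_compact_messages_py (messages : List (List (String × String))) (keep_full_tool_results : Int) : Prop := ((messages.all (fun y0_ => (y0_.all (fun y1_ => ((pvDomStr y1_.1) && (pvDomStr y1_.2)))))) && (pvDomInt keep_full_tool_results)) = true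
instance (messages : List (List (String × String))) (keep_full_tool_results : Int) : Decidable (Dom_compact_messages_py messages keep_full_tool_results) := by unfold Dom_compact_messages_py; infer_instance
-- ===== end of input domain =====

-- B replaces A's reverse-iterate-and-re-reverse with staged passes: count tool messages, find the
-- split index, summarize the prefix, keep the suffix (alternative decomposition, same cost).

-- ===== PORT A =====
-- A's loop over reversed(messages): counter of tool messages seen (from the end);
-- once the counter exceeds keep_full_tool_results, the tool message is replaced by a summary dict.
def compactA_loop (k : Int) : List (List (String × String)) → Int → List (List (String × String))
  | [], _ => []
  | msg :: rest, cnt =>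
    if (PySem.Dict.mk msg).get? "role" == some "tool" then
      if cnt + 1 > k then
        let name := (PySem.Dict.mk msg).getD "tool_name" "tool"
        [("role", "tool"), ("tool_name", name),
         ("content", "[" ++ name ++ " result omitted to save context; see later full results.]")]
          :: compactA_loop k rest (cnt + 1)
      else msg :: compactA_loop k rest (cnt + 1)
    else msg :: compactA_loop k rest cnt

def compact_messages_py (messages : List (List (String × String))) (keep_full_tool_results : Int) : List (List (String × String)) :=
  if (messages.length : Int) ≤ keep_full_tool_results + 2 then messages
  else (compactA_loop keep_full_tool_results messages.reverse 0).reverse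

-- ===== PORT B =====
-- B's helper `_summarize`.
def pvSummarize (msg : List (String × String)) : List (String × String) :=
  let name := (PySem.Dict.mk msg).getD "tool_name" "tool"
  [("role", "tool"), ("tool_name", name),
   ("content", "[" ++ name ++ " result omitted to save context; see later full results.]")]

-- B's split-finding loop (`split`/`seen` with break), as a structural recursion returning the
-- split index relative to the remaining list.
def pvFindSplit (cutoff : Int) : List (List (String × String)) → Int → Nat
  | [], _ => 0
  | msg :: rest, seen =>
    if (PySem.Dict.mk msg).get? "role" == some "tool" then
      if seen + 1 > cutoff then 0
      else 1 + pvFindSplit cutoff rest (seen + 1)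
    else
      let r := pvFindSplit cutoff rest seen
      if r = 0 then 0 else 1 + r

def compact_messages_py_alt (messages : List (List (String × String))) (keep_full_tool_results : Int) : List (List (String × String)) :=
  if (messages.length : Int) ≤ keep_full_tool_results + 2 then messages
  else
    let total : Int := (messages.countP (fun m => (PySem.Dict.mk m).get? "role" == some "tool") : Nat)
    let cutoff := total - keep_full_tool_results
    let s := pvFindSplit cutoff messages 0
    (messages.take s).map
      (fun m => if (PySem.Dict.mk m).get? "role" == some "tool" then pvSummarize m else m)
      ++ messages.drop s

-- ===== PRECONDITION & SPEC =====
def Spec_compact_messages_py (messages : List (List (String × String))) (keep_full_tool_results : Int) (out : List (List (String × String))) : Prop := out = compact_messages_py_alt messages keep_full_tool_results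
instance (messages : List (List (String × String))) (keep_full_tool_results : Int) (out : List (List (String × String))) : Decidable (Spec_compact_messages_py messages keep_full_tool_results out) := by unfold Spec_compact_messages_py; infer_instance

-- ===== CLAIM (what is proved, stated in full; the proofs are below) =====
def Claim_equal_compact_messages_py : Prop := ∀ (messages : List (List (String × String))) (keep_full_tool_results : Int), Dom_compact_messages_py messages keep_full_tool_results → Spec_compact_messages_py messages keep_full_tool_results (compact_messages_py messages keep_full_tool_results)

-- ===== LEMMAS AND PROOFS =====

def isTool (msg : List (String × String)) : Bool :=
  (PySem.Dict.mk msg).get? "role" == some "tool"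

def countT (l : List (List (String × String))) : Int :=
  (l.countP isTool : Nat)

-- Intermediate forward-counting loop used only as a proof bridge between the two ports.
def compactFwd (cutoff : Int) : List (List (String × String)) → Int → List (List (String × String))
  | [], _ => []
  | msg :: rest, seen =>
    if isTool msg then
      if seen + 1 ≤ cutoff then pvSummarize msg :: compactFwd cutoff rest (seen + 1)
      else msg :: compactFwd cutoff rest (seen + 1)
    else msg :: compactFwd cutoff rest seen

theorem countT_cons (m : List (String × String)) (l : List (List (String × String))) :
    countT (m :: l) = countT l + (if isTool m then 1 else 0) := by
  unfold countT
  rw [List.countP_cons]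
  split <;> simp_all

theorem countT_reverse (l : List (List (String × String))) : countT l.reverse = countT l := by
  unfold countT
  rw [List.countP_reverse]

theorem compactFwd_append (c : Int) (xs ys : List (List (String × String))) (i : Int) :
    compactFwd c (xs ++ ys) i = compactFwd c xs i ++ compactFwd c ys (i + countT xs) := by
  induction xs generalizing i with
  | nil => simp [compactFwd, countT]
  | cons m rest ih =>
    rw [countT_cons]
    by_cases hm : isTool m
    · rw [hm, if_pos rfl]
      simp only [List.cons_append, compactFwd, hm, if_true]
      have e : i + (countT rest + 1) = (i + 1) + countT rest := by ring
      split
      · rw [ih, e]; simp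
      · rw [ih, e]; simp
    · rw [if_neg hm]
      simp only [List.cons_append, compactFwd, hm]
      simp only [Bool.false_eq_true, if_false]
      rw [ih]
      rw [show i + (countT rest + 0) = i + countT rest by ring]
      simp

theorem compactFwd_single_tool (c : Int) (m : List (String × String)) (i : Int)
    (hm : isTool m = true) :
    compactFwd c [m] i = if i + 1 ≤ c then [pvSummarize m] else [m] := by
  simp only [compactFwd, hm, if_true]

theorem compactA_reverse_eq (k : Int) (l : List (List (String × String))) (c : Int) :
    (compactA_loop k l c).reverse = compactFwd (countT l + c - k) l.reverse 0 := by
  induction l generalizing c with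
  | nil => simp [compactA_loop, compactFwd, countT]
  | cons m rest ih =>
    have hrev : (m :: rest).reverse = rest.reverse ++ [m] := by simp
    rw [hrev, compactFwd_append, countT_reverse, countT_cons]
    by_cases hm : isTool m
    · have hm' := hm; unfold isTool at hm'
      rw [hm, if_pos rfl]
      have hcut : countT rest + (if isTool m = true then (1:Int) else 0) + c - k
          = countT rest + 1 + c - k := by simp [hm]
      rw [hcut] at *
      rw [compactFwd_single_tool _ _ _ hm]
      by_cases hk : c + 1 > k
      · simp only [compactA_loop, hm', if_true, if_pos hk, List.reverse_cons]
        rw [ih (c + 1)]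
        have h1 : countT rest + (c + 1) - k = countT rest + 1 + c - k := by ring
        rw [h1]
        have h2 : 0 + countT rest + 1 ≤ countT rest + 1 + c - k := by omega
        rw [if_pos h2]
        simp [pvSummarize]
      · simp only [compactA_loop, hm', if_true, if_neg hk, List.reverse_cons]
        rw [ih (c + 1)]
        have h1 : countT rest + (c + 1) - k = countT rest + 1 + c - k := by ring
        rw [h1]
        have h2 : ¬ (0 + countT rest + 1 ≤ countT rest + 1 + c - k) := by omega
        rw [if_neg h2]
    · have hm' := hm; unfold isTool at hm'
      rw [if_neg hm]
      simp only [compactA_loop, hm']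
      simp only [Bool.false_eq_true, if_false, List.reverse_cons]
      rw [ih c]
      rw [show countT rest + 0 + c - k = countT rest + c - k by ring]
      congr 1
      simp [compactFwd, hm]

theorem findSplit_zero_of_le (c : Int) (l : List (List (String × String))) (i : Int)
    (h : c ≤ i) : pvFindSplit c l i = 0 := by
  induction l generalizing i with
  | nil => rfl
  | cons m rest ih =>
    simp only [pvFindSplit]
    by_cases hm : ((PySem.Dict.mk m).get? "role" == some "tool") = true
    · rw [if_pos hm, if_pos (by omega)]
    · rw [if_neg hm, ih i h]
      simp

theorem compactFwd_id_of_split_zero (c : Int) (l : List (List (String × String))) (i : Int)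
    (h : pvFindSplit c l i = 0) : compactFwd c l i = l := by
  induction l generalizing i with
  | nil => rfl
  | cons m rest ih =>
    by_cases hm : isTool m
    · have hm' := hm; unfold isTool at hm'
      simp only [pvFindSplit, hm', if_true] at h
      have hgt : i + 1 > c := by
        by_contra hle
        rw [if_neg hle] at h; omega
      simp only [compactFwd, hm, if_true, if_neg (by omega : ¬ i + 1 ≤ c)]
      rw [ih (i + 1) (findSplit_zero_of_le c rest (i + 1) (by omega))]
    · have hm' := hm; unfold isTool at hm'
      simp only [pvFindSplit, hm', Bool.false_eq_true, if_false] at h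
      have hr : pvFindSplit c rest i = 0 := by
        by_contra hne
        rw [if_neg hne] at h; omega
      simp only [compactFwd, hm, Bool.false_eq_true, if_false]
      rw [ih i hr]

theorem compactFwd_eq_split (c : Int) (l : List (List (String × String))) (i : Int) :
    compactFwd c l i =
      (l.take (pvFindSplit c l i)).map
        (fun m => if (PySem.Dict.mk m).get? "role" == some "tool" then pvSummarize m else m)
      ++ l.drop (pvFindSplit c l i) := by
  induction l generalizing i with
  | nil => rfl
  | cons m rest ih =>
    by_cases hm : isTool m
    · have hm' := hm; unfold isTool at hm'
      by_cases hle : i + 1 ≤ c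
      · simp only [compactFwd, pvFindSplit, hm, hm', if_true, if_neg (by omega : ¬ i + 1 > c),
          if_pos hle]
        rw [ih (i + 1), Nat.add_comm 1 (pvFindSplit c rest (i + 1)), List.take_succ_cons,
          List.drop_succ_cons, List.map_cons, if_pos hm', List.cons_append]
      · simp only [compactFwd, pvFindSplit, hm, hm', if_true, if_pos (by omega : i + 1 > c),
          if_neg hle]
        rw [compactFwd_id_of_split_zero c rest (i + 1)
          (findSplit_zero_of_le c rest (i + 1) (by omega))]
        simp
    · have hm' := hm; unfold isTool at hm'
      simp only [compactFwd, pvFindSplit, hm, hm', Bool.false_eq_true, if_false]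
      by_cases hr : pvFindSplit c rest i = 0
      · rw [if_pos hr]
        rw [ih i, hr]
        simp
      · rw [if_neg hr]
        rw [ih i, Nat.add_comm 1 (pvFindSplit c rest i), List.take_succ_cons,
          List.drop_succ_cons, List.map_cons, if_neg hm', List.cons_append]

-- ===== VERDICT (by name: the statement is the Claim_ definition above) =====
theorem compact_messages_py_spec : Claim_equal_compact_messages_py := by
  intro messages k _
  unfold Spec_compact_messages_py compact_messages_py compact_messages_py_alt
  split
  · rfl
  · rw [compactA_reverse_eq, countT_reverse, List.reverse_reverse]
    have h : countT messages + 0 - k = (messages.countP (fun m => (PySem.Dict.mk m).get? "role" == some "tool") : Nat) - k := by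
      unfold countT isTool; ring
    rw [h, compactFwd_eq_split]
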